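-- pv_equiv track=rewrite | github.com/fawnium/autolang | src/autolang/backend/cfg/cfg.py | _remove_occurrences_of
-- ===== SOURCE A (Python) =====
-- from collections.abc import Iterable, Generator, Sequence, Callable
--
-- def _remove_occurrences_of(target: str,
--                            body: tuple[str, ...]) -> tuple[tuple[str, ...], ...]:
--     '''
--     Params
--     - `target`: symbol whose occurrences are to be removed
--     - `body`: rule body to remove occurrences from
--
--     Overview
--     Returns tuple of new rule bodies, where each body has a subset of occurences of target removed
--     - e.g. for target 'A' and body 'uAv', return {'uv'}
--     - e.g. for target 'A' and body 'uAvAw', return {'uvAw', 'uAvw', 'uvw'}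
--     - does not include original body with no occurrences removed
--     - returned bodies are in lenlex order
--     - NOTE this method is not called when body only consists of target symbol
--
--     Implementation
--     - generate `positions` list of all indices that contain target in body
--     - for all subsets of positions (excl empty subset):
--         - yield a new rule body equal to `body` except with all indices in the subset removed
--     - return all yielded new rule bodies
--
--     Return
--     - tuple of bodies with occurences of target removed
--     '''
--     # Initialise collection of return rule bodies with target omitted
--     bodies_return = []
--
--     # All occurrences of target in body
--     positions = [i for i, symbol in enumerate(body) if symbol == target]
--
--     # Helper to generate all subsets of positions via recursion
--     # NOTE order doesn't matter since the final rules are sorted anyway (but should be implicitly ordered anyway)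
--     def all_subsets(items: list[int]) -> Generator[list[int]]:
--         # Base case
--         if not items:
--             yield []
--         # Recursive case:
--         # Take all subsets of remaining list after first element, and either include or exclude first element
--         else:
--             for subset in all_subsets(items[1:]):
--                 yield subset
--                 yield [items[0]] + subset
--
--     # For each non-empty subset, add new body that omits subset indices
--     for subset in all_subsets(positions):
--         # Exclude empty subset
--         if not subset: continue
--
--         bodies_return.append(tuple(symbol for i, symbol in enumerate(body) if i not in subset))
--
--     # Sort new bodies by lenlex and convert to tuple
--     bodies_return = tuple(sorted(bodies_return, key=lambda rule: (len(rule), rule)))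
--     return bodies_return
-- ===== SOURCE B (Python) =====
-- def _remove_occurrences_of(target, body):
--     # One forward pass: maintain the list of all partial variants of the prefix
--     # read so far; at a target occurrence each partial variant forks into a
--     # keep-it copy and a drop-it original, any other symbol is appended to all.
--     variants = [[]]
--     for symbol in body:
--         if symbol == target:
--             variants = [v + [symbol] for v in variants] + variants
--         else:
--             for v in variants:
--                 v.append(symbol)
--     # The all-kept variant is the unique full-length one; keep only proper variants.
--     proper = [tuple(v) for v in variants if len(v) < len(body)]
--     return tuple(sorted(proper, key=lambda r: (len(r), r)))
-- ===== Notes on version B (the rewrite author's own statement) =====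
-- stated objective: alternative
-- what changed: A enumerates target positions, recursively generates all index subsets, and rebuilds each body by a full enumerate-pass with an i-not-in-subset membership test per subset; B makes a single forward pass over the body, growing the list of all partial variants in place (appending each non-target symbol to every variant, forking keep/drop copies at each target occurrence), keeps the variants shorter than the body, and sorts lenlex the same way.
import Mathlib
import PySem

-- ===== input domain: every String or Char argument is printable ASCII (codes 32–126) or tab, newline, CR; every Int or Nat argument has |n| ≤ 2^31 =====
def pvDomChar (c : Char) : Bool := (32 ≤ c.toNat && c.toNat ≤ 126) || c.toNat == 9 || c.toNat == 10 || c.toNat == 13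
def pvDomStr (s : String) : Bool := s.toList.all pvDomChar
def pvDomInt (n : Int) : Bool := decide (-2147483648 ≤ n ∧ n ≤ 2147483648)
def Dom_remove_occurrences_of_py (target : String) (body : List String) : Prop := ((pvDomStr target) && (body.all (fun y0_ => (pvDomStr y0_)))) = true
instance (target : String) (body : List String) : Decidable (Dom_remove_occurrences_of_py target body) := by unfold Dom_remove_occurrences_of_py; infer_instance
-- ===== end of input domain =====

-- B replaces A's subset-of-positions enumeration (rebuilding each body by a full
-- membership-filtered scan per subset) with a single forward pass over the body that
-- grows all keep/drop variants in place; same lenlex-sorted return value.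

-- ===== PORT A =====
-- helper `all_subsets` of A, literally: yield subset, then [items[0]] + subset
def allSubsetsA : List Int → List (List Int)
  | [] => [[]]
  | x :: xs => (allSubsetsA xs).flatMap (fun s => [s, x :: s])

def remove_occurrences_of_py (target : String) (body : List String) : List (List String) :=
  let positions := ((PySem.List.enumerate body).filter (fun p => p.2 == target)).map (·.1)
  let bodiesReturn := (allSubsetsA positions).foldl
    (fun acc subset =>
      if subset.isEmpty then acc
      else acc ++ [((PySem.List.enumerate body).filter (fun p => decide (¬ p.1 ∈ subset))).map (·.2)])
    []
  PySem.List.sorted2 bodiesReturn (fun r => (r.length : Int)) (fun r => r)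

-- ===== PORT B =====
def remove_occurrences_of_py_alt (target : String) (body : List String) : List (List String) :=
  let variants := body.foldl
    (fun vs symbol =>
      if symbol == target then vs.map (fun v => v ++ [symbol]) ++ vs
      else vs.map (fun v => v ++ [symbol]))
    [[]]
  let proper := (variants.filter (fun v => decide (v.length < body.length))).map (fun v => v)
  PySem.List.sorted2 proper (fun r => (r.length : Int)) (fun r => r)

-- ===== PRECONDITION & SPEC =====
def Spec_remove_occurrences_of_py (target : String) (body : List String) (out : List (List String)) : Prop := out = remove_occurrences_of_py_alt target body
instance (target : String) (body : List String) (out : List (List String)) : Decidable (Spec_remove_occurrences_of_py target body out) := by unfold Spec_remove_occurrences_of_py; infer_instance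

-- ===== CLAIM (what is proved, stated in full; the proofs are below) =====
def Claim_equal_remove_occurrences_of_py : Prop := ∀ (target : String) (body : List String), Dom_remove_occurrences_of_py target body → Spec_remove_occurrences_of_py target body (remove_occurrences_of_py target body)

-- ===== LEMMAS AND PROOFS =====

-- proof-side helper: the suffix-variants list (keep/drop at each target occurrence)
def variantsAlt (target : String) : List String → List (List String)
  | [] => [[]]
  | h :: t =>
    let tails := variantsAlt target t
    let kept := tails.map (h :: ·)
    if h == target then kept ++ tails else kept

theorem flatMap_pair_perm {α β : Type} (l : List α) (f g : α → β) :
    (l.flatMap (fun x => [f x, g x])).Perm (l.map f ++ l.map g) := by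
  induction l with
  | nil => simp
  | cons x xs ih =>
    simp only [List.flatMap_cons, List.map_cons, List.cons_append]
    refine List.Perm.cons _ ?_
    refine ((List.Perm.cons _ ih).trans ?_)
    exact (List.perm_middle).symm

theorem mem_allSubsetsA {S : List Int} {l : List Int} (hS : S ∈ allSubsetsA l) :
    ∀ a ∈ S, a ∈ l := by
  induction l generalizing S with
  | nil => simp_all [allSubsetsA]
  | cons x xs ih =>
    simp only [allSubsetsA, List.mem_flatMap] at hS
    obtain ⟨s, hs, hmem⟩ := hS
    simp only [List.mem_cons, List.not_mem_nil, or_false] at hmem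
    rcases hmem with rfl | rfl
    · exact fun a ha => List.mem_cons_of_mem _ (ih hs a ha)
    · intro a ha
      rcases List.mem_cons.mp ha with rfl | ha
      · exact List.mem_cons_self
      · exact List.mem_cons_of_mem _ (ih hs a ha)

-- positions of target in t, enumerating from offset s (A's `positions` with s = 0)
def posF (target : String) (s : Int) (t : List String) : List Int :=
  ((PySem.List.enumerate t s).filter (fun p => p.2 == target)).map (·.1)

-- A's per-subset body rebuild (the generator expression), enumerating from offset s
def remF (s : Int) (t : List String) (S : List Int) : List String :=
  ((PySem.List.enumerate t s).filter (fun p => decide (¬ p.1 ∈ S))).map (·.2)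

theorem mem_posF {target : String} {s i : Int} {t : List String} (h : i ∈ posF target s t) :
    s ≤ i := by
  simp only [posF, List.mem_map, List.mem_filter] at h
  obtain ⟨p, ⟨hp, _⟩, rfl⟩ := h
  rw [PySem.List.mem_enumerate_iff] at hp
  obtain ⟨k, _, rfl⟩ := hp
  simp

theorem posF_cons (target : String) (s : Int) (x : String) (t : List String) :
    posF target s (x :: t) =
      if x == target then s :: posF target (s + 1) t else posF target (s + 1) t := by
  by_cases h : x == target
  · simp [posF, PySem.List.enumerate_cons, h]
  · simp [posF, PySem.List.enumerate_cons, h]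

theorem remF_cons (s : Int) (x : String) (t : List String) (S : List Int) :
    remF s (x :: t) S = if s ∈ S then remF (s + 1) t S else x :: remF (s + 1) t S := by
  by_cases h : s ∈ S
  · simp [remF, PySem.List.enumerate_cons, h]
  · simp [remF, PySem.List.enumerate_cons, h]

theorem remF_cons_irrel {a s : Int} (t : List String) (S : List Int) (h : a < s) :
    remF s t (a :: S) = remF s t S := by
  simp only [remF]
  congr 1
  apply List.filter_congr
  intro p hp
  rw [PySem.List.mem_enumerate_iff] at hp
  obtain ⟨k, _, rfl⟩ := hp
  simp only [decide_eq_decide, List.mem_cons]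
  constructor
  · intro hn hmem; exact hn (Or.inr hmem)
  · intro hn hmem
    rcases hmem with heq | hmem
    · omega
    · exact hn hmem

-- the multiset of A's rebuilt bodies over ALL subsets is B's variants list
theorem perm_main (target : String) (t : List String) (s : Int) :
    ((allSubsetsA (posF target s t)).map (remF s t)).Perm (variantsAlt target t) := by
  induction t generalizing s with
  | nil => simp [posF, remF, allSubsetsA, variantsAlt, PySem.List.enumerate]
  | cons x ts ih =>
    rw [posF_cons]
    by_cases hx : x == target
    · simp only [hx, if_pos, variantsAlt]
      simp only [allSubsetsA, List.map_flatMap]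
      have hstep : ∀ S ∈ allSubsetsA (posF target (s + 1) ts),
          List.map (remF s (x :: ts)) [S, s :: S]
            = [x :: remF (s + 1) ts S, remF (s + 1) ts S] := by
        intro S hS
        have hnot : s ∉ S := by
          intro hmem
          have := mem_posF (mem_allSubsetsA hS s hmem)
          omega
        simp only [List.map_cons, List.map_nil]
        rw [remF_cons, if_neg hnot, remF_cons, if_pos (List.mem_cons_self),
          remF_cons_irrel _ _ (by omega)]
      rw [List.flatMap_congr hstep]
      refine (flatMap_pair_perm _ _ _).trans ?_
      have hmm : (allSubsetsA (posF target (s + 1) ts)).map (fun S => x :: remF (s + 1) ts S)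
          = ((allSubsetsA (posF target (s + 1) ts)).map (remF (s + 1) ts)).map (x :: ·) := by
        rw [List.map_map]; rfl
      rw [hmm]
      exact List.Perm.append ((ih (s + 1)).map _) (ih (s + 1))
    · simp only [hx, Bool.false_eq_true, if_false, variantsAlt]
      have hstep : ∀ S ∈ allSubsetsA (posF target (s + 1) ts),
          remF s (x :: ts) S = x :: remF (s + 1) ts S := by
        intro S hS
        have hnot : s ∉ S := by
          intro hmem
          have := mem_posF (mem_allSubsetsA hS s hmem)
          omega
        rw [remF_cons, if_neg hnot]
      rw [List.map_congr_left hstep]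
      have hmm : (allSubsetsA (posF target (s + 1) ts)).map (fun S => x :: remF (s + 1) ts S)
          = ((allSubsetsA (posF target (s + 1) ts)).map (remF (s + 1) ts)).map (x :: ·) := by
        rw [List.map_map]; rfl
      rw [hmm]
      simpa [hx] using ((ih (s + 1)).map (x :: ·))

theorem remF_nil_subset (body : List String) : remF 0 body [] = body := by
  simp [remF, List.filter_eq_self.mpr, PySem.List.map_snd_enumerate]

theorem remF_length_lt {target : String} {body : List String} {S : List Int}
    (hS : S ∈ allSubsetsA (posF target 0 body)) (hne : S ≠ []) :
    (remF 0 body S).length < body.length := by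
  obtain ⟨i, hi⟩ := List.exists_mem_of_ne_nil S hne
  have hpos : i ∈ posF target 0 body := mem_allSubsetsA hS i hi
  simp only [posF, List.mem_map, List.mem_filter] at hpos
  obtain ⟨p, ⟨hp, _⟩, hfst⟩ := hpos
  have hlt : ((PySem.List.enumerate body 0).filter
      (fun p => decide (¬ p.1 ∈ S))).length < (PySem.List.enumerate body 0).length := by
    rw [List.length_filter_lt_length_iff_exists]
    exact ⟨p, hp, by simp [hfst, hi]⟩
  simpa [remF, PySem.List.length_enumerate] using hlt

-- the key (len r, r) is injective
theorem lenlex_key_injective :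
    Function.Injective (fun r : List String => toLex ((r.length : Int), r)) := by
  intro a b h
  have := congrArg (fun x => (ofLex x).2) h
  simpa using this

-- Python's tuple key (len(r), r) is sorting by the lexicographic product order,
-- an injective key, so sorting a permutation gives the same list
theorem sorted2_lenlex_eq_of_perm {xs ys : List (List String)} (h : xs.Perm ys) :
    PySem.List.sorted2 xs (fun r => (r.length : Int)) (fun r => r)
      = PySem.List.sorted2 ys (fun r => (r.length : Int)) (fun r => r) := by
  have e : ∀ zs : List (List String),
      PySem.List.sorted2 zs (fun r => (r.length : Int)) (fun r => r)
        = PySem.List.sorted zs (fun r => toLex ((r.length : Int), r)) := by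
    intro zs
    show List.foldl (fun acc x => PySem.List.insertBy (fun a b =>
          decide ((a.length : Int) < (b.length : Int))
            || (!decide ((b.length : Int) < (a.length : Int)) && decide (a < b))) x acc) [] zs
      = List.foldl (fun acc x => PySem.List.insertBy (fun a b =>
          decide (toLex ((a.length : Int), a) < toLex ((b.length : Int), b))) x acc) [] zs
    congr 1
    funext acc x
    congr 1
    funext a b
    rw [Bool.eq_iff_iff]
    simp only [Bool.or_eq_true, Bool.and_eq_true, Bool.not_eq_true', decide_eq_true_eq,
      decide_eq_false_iff_not, Prod.Lex.lt_iff, ofLex_toLex]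
    constructor
    · rintro (h | ⟨h1, h2⟩)
      · exact Or.inl h
      · rcases lt_trichotomy ((a.length : Int)) ((b.length : Int)) with h' | h' | h'
        · exact Or.inl h'
        · exact Or.inr ⟨h', h2⟩
        · exact absurd h' h1
    · rintro (h | ⟨h1, h2⟩)
      · exact Or.inl h
      · exact Or.inr ⟨by rw [h1]; exact lt_irrefl _, h2⟩
  rw [e, e]
  exact PySem.List.sorted_eq_sorted_of_perm _ _ _ lenlex_key_injective h

-- interleaving a flatMap of appended blocks is a permutation of the two flatMaps
theorem flatMap_append_perm {α β : Type} (l : List α) (f g : α → List β) :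
    (l.flatMap (fun x => f x ++ g x)).Perm (l.flatMap f ++ l.flatMap g) := by
  induction l with
  | nil => simp
  | cons x xs ih =>
    simp only [List.flatMap_cons, List.append_assoc]
    refine List.Perm.append_left _ ?_
    refine ((List.Perm.append_left _ ih).trans ?_)
    rw [← List.append_assoc, ← List.append_assoc]
    exact List.Perm.append_right _ (List.perm_append_comm)

-- B's forward pass over `l`, started from any stock of partial variants `vs`
theorem foldl_vars_perm (target : String) (l : List String) (vs : List (List String)) :
    (l.foldl (fun vs symbol =>
        if symbol == target then vs.map (fun v => v ++ [symbol]) ++ vs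
        else vs.map (fun v => v ++ [symbol])) vs).Perm
      (vs.flatMap (fun v => (variantsAlt target l).map (v ++ ·))) := by
  induction l generalizing vs with
  | nil => simp [variantsAlt]
  | cons sym l ih =>
    simp only [List.foldl_cons]
    by_cases hs : sym == target
    · simp only [hs, if_pos]
      refine (ih _).trans ?_
      rw [List.flatMap_append, List.flatMap_map]
      have hkept : ∀ v : List String,
          (variantsAlt target l).map (fun x => v ++ [sym] ++ x)
            = ((variantsAlt target l).map (sym :: ·)).map (v ++ ·) := by
        intro v
        rw [List.map_map]
        apply List.map_congr_left
        intro r _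
        simp
      rw [List.flatMap_congr (fun v _ => hkept v)]
      have hrhs : (fun v => (variantsAlt target (sym :: l)).map (v ++ ·))
          = (fun v : List String => ((variantsAlt target l).map (sym :: ·)).map (v ++ ·)
              ++ (variantsAlt target l).map (v ++ ·)) := by
        funext v
        rw [show variantsAlt target (sym :: l)
            = (variantsAlt target l).map (sym :: ·) ++ variantsAlt target l from by
          simp [variantsAlt, hs], List.map_append]
      rw [hrhs]
      exact (flatMap_append_perm _ _ _).symm
    · simp only [hs, Bool.false_eq_true, if_false]
      refine (ih _).trans ?_
      rw [List.flatMap_map]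
      apply List.Perm.of_eq
      apply List.flatMap_congr
      intro v _
      rw [show variantsAlt target (sym :: l) = (variantsAlt target l).map (sym :: ·) from by
        simp [variantsAlt, hs], List.map_map]
      apply List.map_congr_left
      intro r _
      simp

-- B's pass from the single empty variant produces exactly the suffix-variants list
theorem foldl_vars_eq_variantsAlt (target : String) (body : List String) :
    (body.foldl (fun vs symbol =>
        if symbol == target then vs.map (fun v => v ++ [symbol]) ++ vs
        else vs.map (fun v => v ++ [symbol])) [[]]).Perm (variantsAlt target body) := by
  refine (foldl_vars_perm target body [[]]).trans ?_
  simp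

-- ===== VERDICT (by name: the statement is the Claim_ definition above) =====
theorem remove_occurrences_of_py_spec : Claim_equal_remove_occurrences_of_py := by
  intro target body _
  simp only [Spec_remove_occurrences_of_py, remove_occurrences_of_py, remove_occurrences_of_py_alt]
  apply sorted2_lenlex_eq_of_perm
  have hfn : (fun (acc : List (List String)) (subset : List Int) =>
      if subset.isEmpty then acc
      else acc ++ [((PySem.List.enumerate body).filter
        (fun p => decide (¬ p.1 ∈ subset))).map (·.2)])
      = (fun acc subset => if (!subset.isEmpty) then acc ++ [remF 0 body subset] else acc) := by
    funext acc subset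
    cases h : subset.isEmpty
    · simp [remF]
    · simp
  rw [hfn, PySem.List.foldl_append_if, List.nil_append]
  rw [show (List.map (fun x => x.1)
      (List.filter (fun p => p.2 == target) (PySem.List.enumerate body))) = posF target 0 body
    from rfl]
  have h2 : ((allSubsetsA (posF target 0 body)).map (remF 0 body)).filter
        (fun r => decide (r.length < body.length))
      = ((allSubsetsA (posF target 0 body)).filter (fun s => !s.isEmpty)).map (remF 0 body) := by
    rw [List.filter_map]
    congr 1
    apply List.filter_congr
    intro S hS
    by_cases hne : S = []
    · subst hne
      simp [Function.comp, remF_nil_subset]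
    · simp [Function.comp, remF_length_lt hS hne, hne]
  rw [show ((allSubsetsA (posF target 0 body)).filter (fun s => !s.isEmpty)).map (remF 0 body)
      = ((allSubsetsA (posF target 0 body)).map (remF 0 body)).filter
          (fun r => decide (r.length < body.length)) from h2.symm]
  rw [List.map_id']
  exact ((perm_main target body 0).filter _).trans
    ((foldl_vars_eq_variantsAlt target body).symm.filter _)
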